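-- pv_equiv track=rewrite | github.com/capturcus/messengerscripts | fbutil.py | splitOnSpace
-- ===== SOURCE A (Python) =====
-- def splitOnSpace(text, maxLen):
--     if len(text) <= maxLen:
--         return [text]
--     i = maxLen
--     while text[i] != " " and text[i] != "\n" and i != 0:
--         i -= 1
--     if i == 0:
--         return [text[:maxLen]] + splitOnSpace(text[maxLen+1:], maxLen)
--     return [text[:i]] + splitOnSpace(text[i+1:], maxLen)
-- ===== SOURCE B (Python) =====
-- def splitOnSpace(text, maxLen):
--     # Precompute all break positions once, then walk the text with an
--     # advancing pointer into that list (no per-chunk backward scan).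
--     breaks = [i for i, c in enumerate(text) if c == " " or c == "\n"]
--     result = []
--     pos = 0
--     k = 0
--     n = len(text)
--     while n - pos > maxLen:
--         while k < len(breaks) and breaks[k] <= pos + maxLen:
--             k += 1
--         if k > 0 and breaks[k - 1] > pos:
--             cut = breaks[k - 1]
--             result.append(text[pos:cut])
--             pos = cut + 1
--         else:
--             result.append(text[pos:pos + maxLen])
--             pos = pos + maxLen + 1
--     result.append(text[pos:])
--     return result
-- ===== Notes on version B (the rewrite author's own statement) =====
-- stated objective: alternative
-- what changed: Replaces A's recursion with a per-chunk backward scan by an iterative loop that precomputes all break positions once and walks them with a monotonically advancing pointer.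
import Mathlib
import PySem

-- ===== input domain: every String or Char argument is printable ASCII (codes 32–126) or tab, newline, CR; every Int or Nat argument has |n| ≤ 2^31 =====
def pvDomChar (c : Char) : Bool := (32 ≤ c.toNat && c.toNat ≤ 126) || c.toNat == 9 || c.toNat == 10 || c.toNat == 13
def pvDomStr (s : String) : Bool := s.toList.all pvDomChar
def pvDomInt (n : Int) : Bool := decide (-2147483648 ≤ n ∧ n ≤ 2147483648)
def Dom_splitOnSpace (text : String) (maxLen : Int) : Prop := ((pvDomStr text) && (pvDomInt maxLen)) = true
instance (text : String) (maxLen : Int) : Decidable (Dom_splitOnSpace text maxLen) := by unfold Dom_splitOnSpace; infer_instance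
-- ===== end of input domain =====

-- B precomputes all break positions once and walks the text with an advancing pointer into
-- that list, instead of A's recursion with a per-chunk backward scan (objective: alternative).

-- ===== PORT A =====
-- the while loop: i goes down from maxLen; stops at the first index whose char is ' ' or '\n', or at 0.
-- getD's default '\x00' is never hit on Pre_ inputs (0 ≤ i ≤ maxLen < cs.length at every call).
def pvScanDown (cs : List Char) : Nat → Nat
  | 0 => 0
  | j+1 => if (cs[j+1]?).getD '\x00' = ' ' ∨ (cs[j+1]?).getD '\x00' = '\n' then j + 1
           else pvScanDown cs j

def pvSplitA (cs : List Char) (m : Nat) : List (List Char) :=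
  if h : cs.length ≤ m then [cs]
  else
    let i := pvScanDown cs m
    if i = 0 then cs.take m :: pvSplitA (cs.drop (m+1)) m
    else cs.take i :: pvSplitA (cs.drop (i+1)) m
termination_by cs.length
decreasing_by
  · simp only [List.length_drop]; omega
  · simp only [List.length_drop]; omega

-- maxLen < 0 is outside Pre_ (the Python raises or diverges there); .toNat clamps only there.
def splitOnSpace (text : String) (maxLen : Int) : List String :=
  (pvSplitA text.toList maxLen.toNat).map String.ofList

-- ===== PORT B =====
def pvIsBrk (c : Char) : Bool := c == ' ' || c == '\n'

-- breaks = [i for i, c in enumerate(text) if c == " " or c == "\n"]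
def pvBreaks : List Char → Nat → List Nat
  | [], _ => []
  | c :: cs, i => if pvIsBrk c then i :: pvBreaks cs (i+1) else pvBreaks cs (i+1)

-- the inner while: advance the pointer past all break positions ≤ bound;
-- state = (breaks[k-1] if k > 0, the unconsumed tail breaks[k:]).
def pvAdvance : Option Nat → List Nat → Nat → Option Nat × List Nat
  | last, [], _ => (last, [])
  | last, b :: bs, bound => if b ≤ bound then pvAdvance (some b) bs bound else (last, b :: bs)

-- the outer while, with result accumulator, absolute position pos and pointer state.
def pvChunksB (cs : List Char) (n m pos : Nat) (last : Option Nat) (rest : List Nat)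
    (acc : List String) : List String :=
  if h : n - pos ≤ m then acc ++ [String.ofList (cs.drop pos)]
  else
    match pvAdvance last rest (pos + m) with
    | (some c, rest') =>
      if hc : pos < c then
        pvChunksB cs n m (c+1) (some c) rest' (acc ++ [String.ofList ((cs.drop pos).take (c - pos))])
      else
        pvChunksB cs n m (pos+m+1) (some c) rest' (acc ++ [String.ofList ((cs.drop pos).take m)])
    | (none, rest') =>
        pvChunksB cs n m (pos+m+1) none rest' (acc ++ [String.ofList ((cs.drop pos).take m)])
termination_by n - pos
decreasing_by all_goals omega

def splitOnSpace_alt (text : String) (maxLen : Int) : List String :=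
  pvChunksB text.toList text.toList.length maxLen.toNat 0 none (pvBreaks text.toList 0) []

-- ===== PRECONDITION & SPEC =====
-- Pre_ excludes maxLen < 0, on which the Python A never returns (negative indexing walks off the
-- left end → IndexError, or the slice text[i+1:] stops shrinking → RecursionError).
def Pre_splitOnSpace (text : String) (maxLen : Int) : Prop := 0 ≤ maxLen
instance (text : String) (maxLen : Int) : Decidable (Pre_splitOnSpace text maxLen) := by
  unfold Pre_splitOnSpace; infer_instance

def pvWitness_splitOnSpace : String × Int := ("hello world", 6)

def Spec_splitOnSpace (text : String) (maxLen : Int) (out : List String) : Prop := out = splitOnSpace_alt text maxLen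
instance (text : String) (maxLen : Int) (out : List String) : Decidable (Spec_splitOnSpace text maxLen out) := by unfold Spec_splitOnSpace; infer_instance

-- ===== CLAIM (what is proved, stated in full; the proofs are below) =====
def Claim_equal_splitOnSpace : Prop := ∀ (text : String) (maxLen : Int), Dom_splitOnSpace text maxLen → Pre_splitOnSpace text maxLen → Spec_splitOnSpace text maxLen (splitOnSpace text maxLen)

-- ===== LEMMAS AND PROOFS =====

-- membership in the precomputed break list
theorem mem_pvBreaks (cs : List Char) (i j : Nat) :
    j ∈ pvBreaks cs i ↔ i ≤ j ∧ pvIsBrk ((cs[j - i]?).getD '\x00') = true := by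
  induction cs generalizing i with
  | nil => simp [pvBreaks, pvIsBrk]
  | cons c cs ih =>
      simp only [pvBreaks]
      by_cases hb : pvIsBrk c
      · rw [if_pos hb]
        simp only [List.mem_cons, ih]
        constructor
        · rintro (rfl | ⟨h1, h2⟩)
          · simpa using hb
          · refine ⟨by omega, ?_⟩
            have : j - i = (j - (i+1)) + 1 := by omega
            rw [this]; simpa using h2
        · rintro ⟨h1, h2⟩
          by_cases he : j = i
          · exact Or.inl he
          · refine Or.inr ⟨by omega, ?_⟩
            have : j - i = (j - (i+1)) + 1 := by omega
            rw [this] at h2; simpa using h2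
      · rw [if_neg hb]
        rw [ih]
        constructor
        · rintro ⟨h1, h2⟩
          refine ⟨by omega, ?_⟩
          have : j - i = (j - (i+1)) + 1 := by omega
          rw [this]; simpa using h2
        · rintro ⟨h1, h2⟩
          by_cases he : j = i
          · subst he; simp at h2; exact absurd h2 hb
          · refine ⟨by omega, ?_⟩
            have : j - i = (j - (i+1)) + 1 := by omega
            rw [this] at h2; simpa using h2

theorem pvBreaks_pairwise (cs : List Char) (i : Nat) : (pvBreaks cs i).Pairwise (· < ·) := by
  induction cs generalizing i with
  | nil => simp [pvBreaks]
  | cons c cs ih =>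
      simp only [pvBreaks]
      split
      · refine List.Pairwise.cons ?_ (ih (i+1))
        intro b hb
        have := (mem_pvBreaks cs (i+1) b).mp hb
        omega
      · exact ih (i+1)

-- the inner while: tail and best-so-far characterisation
theorem pvAdvance_spec (rest : List Nat) (last : Option Nat) (bound : Nat)
    (hs : rest.Pairwise (· < ·)) :
    (pvAdvance last rest bound).2 = rest.filter (fun b => decide (bound < b)) ∧
    (((∀ b ∈ rest, bound < b) ∧ (pvAdvance last rest bound).1 = last) ∨
      (∃ c, (pvAdvance last rest bound).1 = some c ∧ c ∈ rest ∧ c ≤ bound ∧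
        ∀ b ∈ rest, b ≤ bound → b ≤ c)) := by
  induction rest generalizing last with
  | nil => simp [pvAdvance]
  | cons b bs ih =>
      rw [List.pairwise_cons] at hs
      by_cases hb : b ≤ bound
      · have h2 := ih (some b) hs.2
        simp only [pvAdvance, if_pos hb]
        constructor
        · rw [h2.1, List.filter_cons_of_neg (by simpa using hb)]
        · rcases h2.2 with ⟨hall, heq⟩ | ⟨c, heq, hc1, hc2, hc3⟩
          · right
            refine ⟨b, heq, List.mem_cons_self .., hb, ?_⟩
            intro x hx hxb
            rcases List.mem_cons.mp hx with rfl | hx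
            · exact le_refl _
            · have := hall x hx; omega
          · right
            refine ⟨c, heq, List.mem_cons_of_mem _ hc1, hc2, ?_⟩
            intro x hx hxb
            rcases List.mem_cons.mp hx with rfl | hx
            · exact le_of_lt (hs.1 c hc1)
            · exact hc3 x hx hxb
      · simp only [pvAdvance, if_neg hb]
        constructor
        · rw [List.filter_cons_of_pos (by simpa using (by omega : bound < b))]
          congr 1
          symm
          rw [List.filter_eq_self]
          intro x hx
          have := hs.1 x hx
          simp; omega
        · left
          refine ⟨?_, by trivial⟩
          intro x hx
          rcases List.mem_cons.mp hx with rfl | hx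
          · omega
          · have := hs.1 x hx; omega

-- A's backward scan: either no break at indices 1..m, or the largest such index
theorem pvScanDown_spec (cs : List Char) (m : Nat) :
    (pvScanDown cs m = 0 ∧ ∀ t, 1 ≤ t → t ≤ m → pvIsBrk ((cs[t]?).getD '\x00') = false) ∨
    (1 ≤ pvScanDown cs m ∧ pvScanDown cs m ≤ m ∧
      pvIsBrk ((cs[pvScanDown cs m]?).getD '\x00') = true ∧
      ∀ t, pvScanDown cs m < t → t ≤ m → pvIsBrk ((cs[t]?).getD '\x00') = false) := by
  induction m with
  | zero => left; exact ⟨rfl, by omega⟩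
  | succ n ih =>
      by_cases hb : (cs[n+1]?).getD '\x00' = ' ' ∨ (cs[n+1]?).getD '\x00' = '\n'
      · right
        have hsc : pvScanDown cs (n+1) = n+1 := by simp [pvScanDown, if_pos hb]
        rw [hsc]
        refine ⟨by omega, by omega, ?_, by omega⟩
        simp only [pvIsBrk]
        rcases hb with hb | hb <;> simp [hb]
      · have hsc : pvScanDown cs (n+1) = pvScanDown cs n := by simp [pvScanDown, if_neg hb]
        have hnb : pvIsBrk ((cs[n+1]?).getD '\x00') = false := by
          simp only [pvIsBrk]
          push_neg at hb
          simp [hb.1, hb.2]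
        rcases ih with ⟨h0, hall⟩ | ⟨h1, h2, h3, h4⟩
        · left
          refine ⟨hsc ▸ h0, ?_⟩
          intro t ht1 ht2
          by_cases he : t = n+1
          · subst he; exact hnb
          · exact hall t ht1 (by omega)
        · right
          rw [hsc]
          refine ⟨h1, by omega, h3, ?_⟩
          intro t ht1 ht2
          by_cases he : t = n+1
          · subst he; exact hnb
          · exact h4 t ht1 (by omega)

-- main loop invariant: B's loop over absolute positions equals A's recursion on the suffix
theorem pvChunksB_eq (d : Nat) : ∀ (cs : List Char) (m pos : Nat) (last : Option Nat)
    (rest : List Nat) (acc : List String),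
    cs.length - pos ≤ d →
    rest = (pvBreaks cs 0).filter (fun b => decide (pos ≤ b)) →
    (∀ c, last = some c → c ≤ pos) →
    pvChunksB cs cs.length m pos last rest acc
      = acc ++ (pvSplitA (cs.drop pos) m).map String.ofList := by
  induction d with
  | zero =>
      intro cs m pos last rest acc hd _ _
      rw [pvChunksB, pvSplitA]
      have h1 : cs.length - pos ≤ m := by omega
      have h2 : (cs.drop pos).length ≤ m := by simp [List.length_drop]; omega
      simp [h1, h2]
  | succ n ih =>
      intro cs m pos last rest acc hd hrest hlast
      by_cases hle : cs.length - pos ≤ m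
      · rw [pvChunksB, pvSplitA]
        have h2 : (cs.drop pos).length ≤ m := by simp [List.length_drop]; omega
        simp [hle, h2]
      · have hsort : rest.Pairwise (· < ·) := by
          rw [hrest]; exact List.Pairwise.filter _ (pvBreaks_pairwise cs 0)
        have h2 : ¬ (cs.drop pos).length ≤ m := by simp [List.length_drop]; omega
        have hmem : ∀ b, b ∈ rest ↔ (pos ≤ b ∧ pvIsBrk ((cs[b]?).getD '\x00') = true) := by
          intro b
          rw [hrest, List.mem_filter, mem_pvBreaks]
          constructor
          · rintro ⟨⟨_, hb2⟩, hb3⟩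
            exact ⟨by simpa using hb3, by simpa using hb2⟩
          · rintro ⟨hb1, hb2⟩
            exact ⟨⟨Nat.zero_le _, by simpa using hb2⟩, by simpa using hb1⟩
        have hidx : ∀ t : Nat, ((cs.drop pos)[t]?) = (cs[pos + t]?) := by
          intro t; rw [List.getElem?_drop]
        have hadv := pvAdvance_spec rest last (pos + m) hsort
        rcases hP : pvAdvance last rest (pos + m) with ⟨st1, st2⟩
        rw [hP] at hadv
        dsimp only at hadv
        have hst2 : st2 = (pvBreaks cs 0).filter (fun b => decide (pos + m < b)) := by
          have h := hadv.1
          rw [hrest, List.filter_filter] at h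
          rw [h]
          exact List.filter_congr (by intro b _; simp; omega)
        rw [pvChunksB, dif_neg hle, hP, pvSplitA, dif_neg h2]
        rcases pvScanDown_spec (cs.drop pos) m with ⟨hs0, hsall⟩ | ⟨hs1, hs2, hs3, hs4⟩
        · -- no break at relative indices 1..m: both take the hard-cut branch
          have hsall' : ∀ b, pos < b → b ≤ pos + m → pvIsBrk ((cs[b]?).getD '\x00') = false := by
            intro b hb1 hb2
            have := hsall (b - pos) (by omega) (by omega)
            rw [hidx] at this
            have he : pos + (b - pos) = b := by omega
            rw [he] at this
            exact this
          have hlast2 : ∀ c0, st1 = some c0 → c0 ≤ pos + m + 1 := by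
            intro c0 hc0
            rcases hadv.2 with ⟨_, heq⟩ | ⟨c1, heq, hc1, hc2, _⟩
            · have h3 : last = some c0 := heq.symm.trans hc0
              have := hlast c0 h3; omega
            · have h3 : c1 = c0 := by
                have h4 : some c1 = some c0 := heq.symm.trans hc0
                injection h4
              omega
          have hnext : st2 = (pvBreaks cs 0).filter (fun b => decide (pos + m + 1 ≤ b)) := by
            rw [hst2]
            exact List.filter_congr (by intro b _; simp; try omega)
          have hdrop : (cs.drop pos).drop (m+1) = cs.drop (pos+m+1) := by
            rw [List.drop_drop]; try congr 1; try omega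
          cases st1 with
          | none =>
              dsimp only
              rw [ih cs m (pos+m+1) none st2 _ (by omega) hnext (by intro c h; cases h)]
              rw [hs0]
              simp [hdrop]
          | some c =>
              have hnc : ¬ pos < c := by
                intro hpc
                rcases hadv.2 with ⟨_, heq⟩ | ⟨c1, heq, hc1, hc2, _⟩
                · have := hlast c heq.symm; omega
                · have hcc : c = c1 := by injection heq
                  subst hcc
                  have hm := (hmem c).mp hc1
                  have := hsall' c hpc hc2
                  rw [hm.2] at this
                  cases this
              dsimp only
              rw [dif_neg hnc]
              rw [ih cs m (pos+m+1) (some c) st2 _ (by omega) hnext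
                    (by intro c' h; injection h with h; subst h; exact hlast2 c rfl)]
              rw [hs0]
              simp [hdrop]
        · -- a break exists: scan s = largest relative break index in 1..m; B finds c = pos + s
          rw [hidx] at hs3
          have hbs : (pos + pvScanDown (cs.drop pos) m) ∈ rest :=
            (hmem _).mpr ⟨by omega, hs3⟩
          rcases hadv.2 with ⟨hall, _⟩ | ⟨c, heq, hc1, hc2, hc3⟩
          · have := hall _ hbs; omega
          · have hc1' := (hmem c).mp hc1
            have hcs : c = pos + pvScanDown (cs.drop pos) m := by
              have hup : pos + pvScanDown (cs.drop pos) m ≤ c := hc3 _ hbs (by omega)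
              by_contra hne
              have := hs4 (c - pos) (by omega) (by omega)
              rw [hidx] at this
              have he : pos + (c - pos) = c := by omega
              rw [he] at this
              rw [hc1'.2] at this
              cases this
            subst heq
            dsimp only
            rw [dif_pos (show pos < c by omega)]
            have hnext : st2 = (pvBreaks cs 0).filter (fun b => decide (c + 1 ≤ b)) := by
              rw [hst2]
              refine List.filter_congr ?_
              intro b hb
              have hbrk : pvIsBrk ((cs[b]?).getD '\x00') = true := by
                have := (mem_pvBreaks cs 0 b).mp hb
                simpa using this.2
              simp only [decide_eq_decide]
              constructor
              · intro h; omega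
              · intro h
                by_contra hgt
                have hb' : b ∈ rest := (hmem b).mpr ⟨by omega, hbrk⟩
                have := hc3 b hb' (by omega)
                omega
            have hdrop : (cs.drop pos).drop (pvScanDown (cs.drop pos) m + 1) = cs.drop (c+1) := by
              rw [List.drop_drop]; try congr 1; try omega
            have hcp : c - pos = pvScanDown (cs.drop pos) m := by omega
            rw [ih cs m (c+1) (some c) st2 _ (by omega) hnext
                  (by intro c' h; injection h with h; omega)]
            rw [if_neg (by omega : ¬ pvScanDown (cs.drop pos) m = 0)]
            simp [hdrop, hcp]

-- ===== VERDICT (by name: the statement is the Claim_ definition above) =====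
theorem splitOnSpace_spec : Claim_equal_splitOnSpace := by
  intro text maxLen _ _
  unfold Spec_splitOnSpace splitOnSpace splitOnSpace_alt
  rw [pvChunksB_eq text.toList.length text.toList maxLen.toNat 0 none _ [] (by omega)
        (by symm; rw [List.filter_eq_self]; intro b _; simp) (by intro c h; cases h)]
  simp
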